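-- pv_equiv track=rewrite | github.com/sarahbkim/cracking_python | cracking.py | unique_string
-- ===== SOURCE A (Python) =====
-- def unique_string(s):
--     # return True if it's just a single char
--     if len(s)==1:
--         return True
--
--     # otherwise loop
--     for i, x in enumerate(s):
--         start = s[i]
--         if(i<len(s)-1):
--             if (start==s[i+1]):
--                 return False
--     return True
-- ===== SOURCE B (Python) =====
-- def unique_string(s):
--     # run-length encode s, then the string is valid iff every maximal run
--     # of equal adjacent characters has length exactly 1
--     if not s:
--         return True
--     runs = []
--     cur, cnt = s[0], 1
--     for ch in s[1:]:
--         if ch == cur: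
--             cnt += 1
--         else:
--             runs.append((cur, cnt))
--             cur, cnt = ch, 1
--     runs.append((cur, cnt))
--     return all(n == 1 for _, n in runs)
-- ===== Notes on version B (the rewrite author's own statement) =====
-- stated objective: alternative
-- what changed: B replaces A's index-based pairwise comparison (enumerate + s[i]==s[i+1]) with a single run-length-encoding pass whose runs are then all checked to have length 1.
import Mathlib
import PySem

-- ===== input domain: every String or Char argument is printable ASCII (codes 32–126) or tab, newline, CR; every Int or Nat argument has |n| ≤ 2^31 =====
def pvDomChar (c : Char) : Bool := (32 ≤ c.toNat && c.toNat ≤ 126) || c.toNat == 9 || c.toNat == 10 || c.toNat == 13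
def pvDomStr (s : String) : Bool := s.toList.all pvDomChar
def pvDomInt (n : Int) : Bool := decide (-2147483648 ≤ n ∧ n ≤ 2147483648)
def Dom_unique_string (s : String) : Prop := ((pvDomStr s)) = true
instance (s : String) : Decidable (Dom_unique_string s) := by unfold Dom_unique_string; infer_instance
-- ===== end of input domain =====

-- B re-implements A's adjacent-duplicate check via run-length encoding (alternative decomposition, same cost).

-- ===== PORT A =====
-- the 'for i, x in enumerate(s): …' loop with its early 'return False'
def uniqLoop (cs : List Char) : List (Int × Char) → Bool
  | [] => true
  | (i, _x) :: rest =>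
    let start := PySem.List.pyGet? cs i
    if i < (cs.length : Int) - 1 then
      if start == PySem.List.pyGet? cs (i + 1) then false
      else uniqLoop cs rest
    else uniqLoop cs rest

def unique_string (s : String) : Bool :=
  if PySem.Str.len s == 1 then true
  else uniqLoop s.toList (PySem.List.enumerate s.toList)

-- ===== PORT B =====
-- one step of the run-length loop: state = (finished runs, current char, current count)
def rleStep (st : List (Char × Nat) × Char × Nat) (ch : Char) : List (Char × Nat) × Char × Nat :=
  if ch == st.2.1 then (st.1, st.2.1, st.2.2 + 1)
  else (st.1 ++ [(st.2.1, st.2.2)], ch, 1)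

def unique_string_alt (s : String) : Bool :=
  match s.toList with
  | [] => true
  | c :: t =>
    let st := t.foldl rleStep ([], c, 1)
    (st.1 ++ [(st.2.1, st.2.2)]).all (fun p => p.2 == 1)

-- ===== PRECONDITION & SPEC =====
def Spec_unique_string (s : String) (out : Bool) : Prop := out = unique_string_alt s
instance (s : String) (out : Bool) : Decidable (Spec_unique_string s out) := by unfold Spec_unique_string; infer_instance

-- ===== CLAIM (what is proved, stated in full; the proofs are below) =====
def Claim_equal_unique_string : Prop := ∀ (s : String), Dom_unique_string s → Spec_unique_string s (unique_string s)

-- ===== LEMMAS AND PROOFS =====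

-- common characterisation: no two adjacent characters are equal
def noAdj : List Char → Bool
  | a :: b :: t => !(a == b) && noAdj (b :: t)
  | _ => true

theorem rle_all_eq (t : List Char) : ∀ (acc : List (Char × Nat)) (c : Char) (n : Nat), 1 ≤ n →
    (((t.foldl rleStep (acc, c, n)).1 ++ [((t.foldl rleStep (acc, c, n)).2.1, (t.foldl rleStep (acc, c, n)).2.2)]).all (fun p => p.2 == 1))
      = (acc.all (fun p => p.2 == 1) && (n == 1) && noAdj (c :: t)) := by
  induction t with
  | nil => intro acc c n _; simp [noAdj]
  | cons x t ih =>
    intro acc c n hn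
    by_cases h : x = c
    · subst h
      simp only [List.foldl_cons, rleStep]
      rw [if_pos (by simp), ih acc x (n + 1) (by omega)]
      simp only [noAdj, beq_self_eq_true, Bool.not_true, Bool.false_and]
      simp
      omega
    · simp only [List.foldl_cons, rleStep]
      rw [if_neg (by simp [h]), ih (acc ++ [(c, n)]) x 1 (by omega)]
      simp only [noAdj, List.all_append]
      have hne : (c == x) = false := beq_eq_false_iff_ne.mpr (fun e => h e.symm)
      simp [hne, Bool.and_comm]

theorem alt_eq_noAdj (s : String) : unique_string_alt s = noAdj s.toList := by
  unfold unique_string_alt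
  cases h : s.toList with
  | nil => simp [noAdj]
  | cons c t =>
    dsimp only
    rw [rle_all_eq t [] c 1 (by omega)]
    simp

theorem uniqLoop_eq_noAdj (t : List Char) : ∀ (k : Nat) (cs : List Char), cs.drop k = t →
    uniqLoop cs (PySem.List.enumerate t k) = noAdj t := by
  induction t with
  | nil => intro k cs _; simp [PySem.List.enumerate_nil, uniqLoop, noAdj]
  | cons x t ih =>
    intro k cs hdrop
    have hx : cs[k]? = some x := by
      have h0 : (List.drop k cs)[0]? = some x := by rw [hdrop]; rfl
      rw [List.getElem?_drop] at h0
      simpa using h0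
    have hk : k < cs.length := (List.getElem?_eq_some_iff.mp hx).1
    rw [PySem.List.enumerate_cons]
    cases t with
    | nil =>
      -- last index: i = len-1, guard false
      have hlen : cs.length = k + 1 := by
        have hd := congrArg List.length hdrop
        simp at hd; omega
      simp only [uniqLoop, hlen]
      rw [if_neg (by omega)]
      simp [PySem.List.enumerate_nil, uniqLoop, noAdj]
    | cons y t' =>
      have hy : cs[k+1]? = some y := by
        have h1 : (List.drop k cs)[1]? = some y := by rw [hdrop]; rfl
        rw [List.getElem?_drop] at h1
        simpa using h1
      have hlen : k + 2 ≤ cs.length := by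
        have hd := congrArg List.length hdrop
        simp at hd; omega
      simp only [uniqLoop]
      rw [if_pos (by omega)]
      have hgx : PySem.List.pyGet? cs (k : Int) = some x := by
        rw [PySem.List.pyGet?_natCast]; exact hx
      have hgy : PySem.List.pyGet? cs ((k : Int) + 1) = some y := by
        have : ((k : Int) + 1) = ((k + 1 : Nat) : Int) := by push_cast; ring
        rw [this, PySem.List.pyGet?_natCast]; exact hy
      rw [hgx, hgy]
      by_cases hxy : x = y
      · subst hxy; simp [noAdj]
      · rw [if_neg (by simp [hxy])]
        have hrec : cs.drop (k + 1) = y :: t' := by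
          have h1 : List.drop 1 (List.drop k cs) = y :: t' := by rw [hdrop]; rfl
          rwa [List.drop_drop] at h1
        have hcast : ((k : Int) + 1) = ((k + 1 : Nat) : Int) := by omega
        rw [hcast, ih (k + 1) cs hrec]
        simp [noAdj, hxy]

theorem a_eq_noAdj (s : String) : unique_string s = noAdj s.toList := by
  unfold unique_string
  by_cases h : PySem.Str.len s == 1
  · rw [if_pos h]
    have : s.toList.length = 1 := by
      rw [PySem.Str.len_eq s, beq_iff_eq] at h
      omega
    obtain ⟨c, hc⟩ := List.length_eq_one_iff.mp this
    simp [hc, noAdj]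
  · rw [if_neg h]
    exact uniqLoop_eq_noAdj s.toList 0 s.toList (by simp)

-- ===== VERDICT (by name: the statement is the Claim_ definition above) =====
theorem unique_string_spec : Claim_equal_unique_string := by
  intro s _
  unfold Spec_unique_string
  rw [a_eq_noAdj, alt_eq_noAdj]
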